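-- pv_equiv track=rewrite | github.com/eliottcassidy2000/math | 04-computation/c4_induction_test.py | compute_F_dp_digraph
-- ===== SOURCE A (Python) =====
-- def compute_F_dp_digraph(adj, n):
--     """F(D,x) for a general digraph (not necessarily tournament).
--     asc counts positions where adj[P[i]][P[i+1]] = 1."""
--     dp = [[[0] * n for _ in range(n)] for _ in range(1 << n)]
--     for v in range(n):
--         dp[1 << v][v][0] = 1
--     for mask in range(1, 1 << n):
--         for last in range(n):
--             if not (mask & (1 << last)):
--                 continue
--             for fwd in range(n):
--                 if dp[mask][last][fwd] == 0:
--                     continue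
--                 for nxt in range(n):
--                     if mask & (1 << nxt):
--                         continue
--                     new_mask = mask | (1 << nxt)
--                     if adj[last][nxt]:
--                         dp[new_mask][nxt][fwd + 1] += dp[mask][last][fwd]
--                     else:
--                         dp[new_mask][nxt][fwd] += dp[mask][last][fwd]
--     full = (1 << n) - 1
--     F = [0] * n
--     for last in range(n):
--         for fwd in range(n):
--             F[fwd] += dp[full][last][fwd]
--     return F
-- ===== SOURCE B (Python) =====
-- from functools import lru_cache
--
-- def compute_F_dp_digraph(adj, n):
--     """Top-down memoized pull recursion: f(mask, last) is the ascent-count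
--     coefficient vector of Hamiltonian paths over mask ending at last."""
--     @lru_cache(maxsize=None)
--     def f(mask, last):
--         if mask == (1 << last):
--             return tuple([1] + [0] * (n - 1))
--         rest = mask - (1 << last)
--         acc = tuple([0] * n)
--         for prev in range(n):
--             if rest & (1 << prev):
--                 g = f(rest, prev)
--                 if adj[prev][last]:
--                     g = (0,) + g[:-1]
--                 acc = tuple(a + b for a, b in zip(acc, g))
--         return acc
--     full = (1 << n) - 1
--     F = [0] * n
--     for last in range(n):
--         F = [a + b for a, b in zip(F, f(full, last))]
--     return F
-- ===== Notes on version B (the rewrite author's own statement) =====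
-- stated objective: alternative
-- what changed: Replaces A's bottom-up push DP that sweeps a full 2^n x n x n table in mask order with a top-down memoized pull recursion f(mask,last) returning the ascent-coefficient vector of Hamiltonian paths over mask ending at last, combined at the top by vector sums.
-- outside the precondition, e.g. on compute_F_dp_digraph([[0, 0], [0]], 2): A returns [2, 0], B returns [2, 0]
import Mathlib
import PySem

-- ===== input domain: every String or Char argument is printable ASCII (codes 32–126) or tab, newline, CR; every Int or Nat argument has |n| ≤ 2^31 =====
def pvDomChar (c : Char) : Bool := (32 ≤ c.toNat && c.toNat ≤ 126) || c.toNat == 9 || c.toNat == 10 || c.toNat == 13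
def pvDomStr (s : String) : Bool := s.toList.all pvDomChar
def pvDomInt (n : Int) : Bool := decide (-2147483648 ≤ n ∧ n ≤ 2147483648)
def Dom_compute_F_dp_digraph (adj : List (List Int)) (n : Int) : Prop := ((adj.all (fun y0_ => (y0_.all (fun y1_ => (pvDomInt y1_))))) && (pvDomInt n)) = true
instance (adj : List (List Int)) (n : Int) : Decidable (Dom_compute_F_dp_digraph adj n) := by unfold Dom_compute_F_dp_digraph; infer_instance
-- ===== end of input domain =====

-- B re-implements A's bottom-up push DP over a 2^n×n×n table as a top-down
-- pull recursion on (mask, last) returning ascent-coefficient vectors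
-- (objective: alternative; in Python B memoizes with lru_cache — memoization
-- does not change the computed values, so the Lean port is the plain recursion).

-- ===== PORT A =====
-- adj[i][j] (indices always in range on admitted inputs; getD is the literal read)
def pvAdj (adj : List (List Int)) (i j : Nat) : Int := (adj.getD i []).getD j 0

-- dp[i][j][k]
def pvGet3 (dp : List (List (List Int))) (i j k : Nat) : Int :=
  ((dp.getD i []).getD j []).getD k 0

-- dp[i][j][k] = v
def pvSet3 (dp : List (List (List Int))) (i j k : Nat) (v : Int) : List (List (List Int)) :=
  dp.set i ((dp.getD i []).set j (((dp.getD i []).getD j []).set k v))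

-- body of `for nxt in range(n)`
def pvPush (adj : List (List Int)) (mask last fwd : Nat)
    (dp : List (List (List Int))) (nxt : Nat) : List (List (List Int)) :=
  if mask &&& 2 ^ nxt ≠ 0 then dp
  else
    let new_mask := mask ||| 2 ^ nxt
    if pvAdj adj last nxt ≠ 0 then
      pvSet3 dp new_mask nxt (fwd + 1) (pvGet3 dp new_mask nxt (fwd + 1) + pvGet3 dp mask last fwd)
    else
      pvSet3 dp new_mask nxt fwd (pvGet3 dp new_mask nxt fwd + pvGet3 dp mask last fwd)

-- body of `for fwd in range(n)`
def pvFwdStep (adj : List (List Int)) (N mask last : Nat)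
    (dp : List (List (List Int))) (fwd : Nat) : List (List (List Int)) :=
  if pvGet3 dp mask last fwd = 0 then dp
  else (List.range N).foldl (pvPush adj mask last fwd) dp

-- body of `for last in range(n)`
def pvLastStep (adj : List (List Int)) (N mask : Nat)
    (dp : List (List (List Int))) (last : Nat) : List (List (List Int)) :=
  if mask &&& 2 ^ last = 0 then dp
  else (List.range N).foldl (pvFwdStep adj N mask last) dp

-- body of `for mask in range(1, 1 << n)`
def pvMaskStep (adj : List (List Int)) (N : Nat)
    (dp : List (List (List Int))) (mask : Nat) : List (List (List Int)) :=
  (List.range N).foldl (pvLastStep adj N mask) dp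

def compute_F_dp_digraph (adj : List (List Int)) (n : Int) : List Int :=
  let N := n.toNat
  let dp0 := List.replicate (2 ^ N) (List.replicate N (List.replicate N (0 : Int)))
  let dp1 := (List.range N).foldl (fun dp v => pvSet3 dp (2 ^ v) v 0 1) dp0
  let dp2 := (List.range' 1 (2 ^ N - 1)).foldl (pvMaskStep adj N) dp1
  let full := 2 ^ N - 1
  (List.range N).foldl (fun F last =>
      (List.range N).foldl (fun F fwd =>
          F.set fwd (F.getD fwd 0 + pvGet3 dp2 full last fwd)) F)
    (List.replicate N (0 : Int))

-- ===== PORT B =====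
-- f(mask, last) of Source B; the outer `if testBit` is only a totality guard
-- (Python's f is only ever called with bit `last` set in `mask`).
def fB (adj : List (List Int)) (N mask last : Nat) : List Int :=
  if h : mask.testBit last then
    if mask = 2 ^ last then (1 : Int) :: List.replicate (N - 1) 0
    else
      let rest := mask - 2 ^ last
      (List.range N).foldl
        (fun acc prev =>
          if rest &&& 2 ^ prev ≠ 0 then
            List.zipWith (· + ·) acc
              (if pvAdj adj prev last ≠ 0 then (0 : Int) :: (fB adj N rest prev).dropLast
               else fB adj N rest prev)
          else acc)
        (List.replicate N (0 : Int))
  else List.replicate N 0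
termination_by mask
decreasing_by
  all_goals
    have h1 := Nat.ge_two_pow_of_testBit h
    have h2 : 0 < 2 ^ last := Nat.two_pow_pos last
    omega

def compute_F_dp_digraph_alt (adj : List (List Int)) (n : Int) : List Int :=
  let N := n.toNat
  let full := 2 ^ N - 1
  (List.range N).foldl (fun F last => List.zipWith (· + ·) F (fB adj N full last))
    (List.replicate N (0 : Int))

-- ===== PRECONDITION & SPEC =====
-- Exactly where Python A returns: n ≥ 0 (1 << n raises ValueError for n < 0) and, when
-- n ≥ 2, the first n rows of adj must be long enough for the reads adj[i][j], i,j < n.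
-- Marginal stated narrowing: A never reads the diagonal adj[i][i], so row n-1 of length
-- exactly n-1 would also let A return; Pre_ asks length ≥ n of all first n rows.
def Pre_compute_F_dp_digraph (adj : List (List Int)) (n : Int) : Prop :=
  0 ≤ n ∧ (1 < n → n.toNat ≤ adj.length ∧ ∀ row ∈ adj.take n.toNat, n.toNat ≤ row.length)
instance (adj : List (List Int)) (n : Int) : Decidable (Pre_compute_F_dp_digraph adj n) := by
  unfold Pre_compute_F_dp_digraph; infer_instance

def pvWitness_compute_F_dp_digraph : List (List Int) × Int := ([[0, 1], [1, 0]], 2)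

def Spec_compute_F_dp_digraph (adj : List (List Int)) (n : Int) (out : List Int) : Prop := out = compute_F_dp_digraph_alt adj n
instance (adj : List (List Int)) (n : Int) (out : List Int) : Decidable (Spec_compute_F_dp_digraph adj n out) := by unfold Spec_compute_F_dp_digraph; infer_instance

-- ===== CLAIM (what is proved, stated in full; the proofs are below) =====
def Claim_equal_compute_F_dp_digraph : Prop := ∀ (adj : List (List Int)) (n : Int), Dom_compute_F_dp_digraph adj n → Pre_compute_F_dp_digraph adj n → Spec_compute_F_dp_digraph adj n (compute_F_dp_digraph adj n)

-- ===== LEMMAS AND PROOFS =====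

/- ## Bit arithmetic -/

theorem pv_and_two_pow_eq_zero (m i : Nat) : (m &&& 2 ^ i = 0) ↔ m.testBit i = false := by
  have h2 := Nat.two_pow_pos i
  rw [Nat.and_two_pow]
  cases h : m.testBit i <;> simp

theorem pv_or_add {a : Nat} (i : Nat) (h : a.testBit i = false) : a ||| 2 ^ i = a + 2 ^ i := by
  have hd := Nat.div_add_mod a (2 ^ (i + 1))
  have hrlt : a % 2 ^ (i + 1) < 2 ^ (i + 1) := Nat.mod_lt _ (Nat.two_pow_pos _)
  have hbit : (a % 2 ^ (i + 1)).testBit i = false := by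
    rw [Nat.testBit_mod_two_pow]; simp [h]
  have hri : a % 2 ^ (i + 1) < 2 ^ i := by
    by_contra hcon
    rw [Nat.not_lt] at hcon
    have := Nat.testBit_of_two_pow_le_and_two_pow_add_one_gt hcon hrlt
    rw [hbit] at this; exact Bool.false_ne_true this
  have e1 : a = 2 ^ (i + 1) * (a / 2 ^ (i + 1)) + a % 2 ^ (i + 1) := hd.symm
  have e2 : a + 2 ^ i = 2 ^ i * (2 * (a / 2 ^ (i + 1)) + 1) + a % 2 ^ (i + 1) := by
    conv_lhs => rw [e1]
    rw [pow_succ]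
    ring
  have e3 : a + 2 ^ i = 2 ^ i * (2 * (a / 2 ^ (i + 1)) + 1) ||| a % 2 ^ (i + 1) := by
    rw [e2]; exact Nat.two_pow_add_eq_or_of_lt hri _
  have e4 : a = 2 ^ (i + 1) * (a / 2 ^ (i + 1)) ||| a % 2 ^ (i + 1) := by
    conv_lhs => rw [e1]
    exact Nat.two_pow_add_eq_or_of_lt hrlt _
  have e5 : 2 ^ i * (2 * (a / 2 ^ (i + 1)) + 1) = 2 ^ (i + 1) * (a / 2 ^ (i + 1)) ||| 2 ^ i := by
    rw [← Nat.two_pow_add_eq_or_of_lt (Nat.pow_lt_pow_succ (by omega)) (a / 2 ^ (i + 1))]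
    rw [pow_succ]
    ring
  calc a ||| 2 ^ i = (2 ^ (i + 1) * (a / 2 ^ (i + 1)) ||| a % 2 ^ (i + 1)) ||| 2 ^ i := by
        conv_lhs => rw [e4]
    _ = (2 ^ (i + 1) * (a / 2 ^ (i + 1)) ||| 2 ^ i) ||| a % 2 ^ (i + 1) := by
        rw [Nat.or_assoc, Nat.or_assoc, Nat.or_comm (a % 2 ^ (i + 1))]
    _ = 2 ^ i * (2 * (a / 2 ^ (i + 1)) + 1) ||| a % 2 ^ (i + 1) := by rw [e5]
    _ = a + 2 ^ i := e3.symm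

theorem pv_or_testBit_self (a i : Nat) : (a ||| 2 ^ i).testBit i = true := by
  simp [Nat.testBit_or, Nat.testBit_two_pow_self]

theorem pv_or_ne {m nx : Nat} (h : m.testBit nx = false) : m ||| 2 ^ nx ≠ m := by
  intro hc
  have := pv_or_testBit_self m nx
  rw [hc, h] at this
  exact Bool.false_ne_true this

theorem pv_clear {M l : Nat} (h : M.testBit l = true) :
    (M - 2 ^ l).testBit l = false ∧ (M - 2 ^ l) ||| 2 ^ l = M ∧ 2 ^ l ≤ M := by
  have hle : 2 ^ l ≤ M := Nat.ge_two_pow_of_testBit h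
  have hb : (M ^^^ 2 ^ l).testBit l = false := by
    simp [Nat.testBit_xor, h, Nat.testBit_two_pow_self]
  have hor : (M ^^^ 2 ^ l) ||| 2 ^ l = M := by
    apply Nat.eq_of_testBit_eq
    intro j
    by_cases hj : j = l
    · subst hj; simp [Nat.testBit_or, Nat.testBit_two_pow_self, h]
    · simp [Nat.testBit_or, Nat.testBit_xor,
        Nat.testBit_two_pow_of_ne (fun e => hj e.symm)]
  have hadd : (M ^^^ 2 ^ l) + 2 ^ l = M := by rw [← pv_or_add l hb, hor]
  have hsub : M - 2 ^ l = M ^^^ 2 ^ l := by omega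
  rw [hsub]
  exact ⟨hb, hor, hle⟩

theorem pv_or_sub {m nx : Nat} (h : m.testBit nx = false) :
    (m ||| 2 ^ nx) - 2 ^ nx = m := by
  rw [pv_or_add nx h]; omega

/- ## getD/set basics -/

theorem pvGetDSet {α : Type} (l : List α) (i j : Nat) (v d : α) :
    (l.set i v).getD j d = if j = i ∧ i < l.length then v else l.getD j d := by
  rw [List.getD_eq_getElem?_getD, List.getD_eq_getElem?_getD, List.getElem?_set]
  by_cases hij : i = j
  · subst hij
    by_cases hi : i < l.length
    · simp [hi]
    · simp [hi]
  · rw [if_neg hij, if_neg (fun hc => hij hc.1.symm)]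

/- ## pvGet3 / pvSet3 -/

def pvShape (N : Nat) (dp : List (List (List Int))) : Prop :=
  dp.length = 2 ^ N ∧ ∀ r ∈ dp, r.length = N ∧ ∀ q ∈ r, q.length = N

-- pvSet3 is the identity whenever an index is out of range
theorem pvSet3_oob_eq {N : Nat} {dp : List (List (List Int))} (hs : pvShape N dp)
    {i j k : Nat} (h : ¬(i < dp.length ∧ j < N ∧ k < N)) (v : Int) :
    pvSet3 dp i j k v = dp := by
  by_cases hi : i < dp.length
  · have hrow : dp.getD i [] ∈ dp := by
      rw [List.getD_eq_getElem _ _ hi]; exact List.getElem_mem _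
    obtain ⟨hrl, hrq⟩ := hs.2 _ hrow
    by_cases hj : j < N
    · have hjl : j < (dp.getD i []).length := by omega
      have hinner : (dp.getD i []).getD j [] ∈ dp.getD i [] := by
        rw [List.getD_eq_getElem _ _ hjl]; exact List.getElem_mem _
      have hql := hrq _ hinner
      have hk : N ≤ k := by omega
      have hinner_eq : ((dp.getD i []).getD j []).set k v = (dp.getD i []).getD j [] :=
        List.set_eq_of_length_le (by omega)
      unfold pvSet3
      rw [hinner_eq, List.getD_eq_getElem _ _ hjl, List.set_getElem_self,
        List.getD_eq_getElem _ _ hi, List.set_getElem_self]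
    · have hrow_eq : (dp.getD i []).set j (((dp.getD i []).getD j []).set k v)
          = dp.getD i [] := List.set_eq_of_length_le (by omega)
      unfold pvSet3
      rw [hrow_eq, List.getD_eq_getElem _ _ hi, List.set_getElem_self]
  · unfold pvSet3
    exact List.set_eq_of_length_le (by omega)

theorem pvSet3_shape {N : Nat} {dp : List (List (List Int))} (hs : pvShape N dp)
    (i j k : Nat) (v : Int) : pvShape N (pvSet3 dp i j k v) := by
  by_cases hb : i < dp.length ∧ j < N ∧ k < N
  · obtain ⟨hi, hj, hk⟩ := hb
    have hrow : dp.getD i [] ∈ dp := by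
      rw [List.getD_eq_getElem _ _ hi]; exact List.getElem_mem _
    obtain ⟨hrl, hrq⟩ := hs.2 _ hrow
    refine ⟨by rw [pvSet3, List.length_set]; exact hs.1, ?_⟩
    intro r hr
    rcases List.mem_or_eq_of_mem_set hr with hr' | rfl
    · exact hs.2 r hr'
    · refine ⟨by rw [List.length_set]; exact hrl, ?_⟩
      intro q hq
      rcases List.mem_or_eq_of_mem_set hq with hq' | rfl
      · exact hrq q hq'
      · have hjl : j < (dp.getD i []).length := by omega
        have hinner : (dp.getD i []).getD j [] ∈ dp.getD i [] := by
          rw [List.getD_eq_getElem _ _ hjl]; exact List.getElem_mem _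
        rw [List.length_set]
        exact hrq _ hinner
  · rw [pvSet3_oob_eq hs hb]
    exact hs

theorem pvGet3_set3 {N : Nat} {dp : List (List (List Int))} (hs : pvShape N dp)
    {i j k : Nat} (hi : i < 2 ^ N) (hj : j < N) (hk : k < N) (v : Int) (a b c : Nat) :
    pvGet3 (pvSet3 dp i j k v) a b c =
      if a = i ∧ b = j ∧ c = k then v else pvGet3 dp a b c := by
  have hil : i < dp.length := by rw [hs.1]; exact hi
  have hrow : dp.getD i [] ∈ dp := by
    rw [List.getD_eq_getElem _ _ hil]; exact List.getElem_mem _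
  obtain ⟨hrl, hrq⟩ := hs.2 _ hrow
  have hinner : (dp.getD i []).getD j [] ∈ dp.getD i [] := by
    rw [List.getD_eq_getElem _ _ (by omega : j < (dp.getD i []).length)]
    exact List.getElem_mem _
  have hql := hrq _ hinner
  unfold pvGet3 pvSet3
  rw [pvGetDSet]
  by_cases hai : a = i
  · subst hai
    rw [if_pos ⟨rfl, hil⟩, pvGetDSet]
    by_cases hbj : b = j
    · subst hbj
      rw [if_pos ⟨rfl, by omega⟩, pvGetDSet]
      by_cases hck : c = k
      · subst hck
        rw [if_pos ⟨rfl, by omega⟩, if_pos ⟨rfl, rfl, rfl⟩]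
      · rw [if_neg (by tauto), if_neg (by tauto)]
    · rw [if_neg (by tauto), if_neg (by tauto)]
  · rw [if_neg (by tauto), if_neg (by tauto)]

theorem pvGet3_set3_oob {N : Nat} {dp : List (List (List Int))} (hs : pvShape N dp)
    {k : Nat} (hk : N ≤ k) (i j : Nat) (v : Int) (a b c : Nat) :
    pvGet3 (pvSet3 dp i j k v) a b c = pvGet3 dp a b c := by
  rw [pvSet3_oob_eq hs (by omega) v]

/- ## fB facts -/

theorem pvZipGetD {a b : List Int} {N f : Nat} (ha : a.length = N) (hb : b.length = N)
    (hf : f < N) : (List.zipWith (· + ·) a b).getD f 0 = a.getD f 0 + b.getD f 0 := by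
  have h3 : f < (List.zipWith (· + ·) a b).length := by
    rw [List.length_zipWith]; omega
  rw [List.getD_eq_getElem _ _ h3, List.getElem_zipWith,
    List.getD_eq_getElem _ _ (by omega), List.getD_eq_getElem _ _ (by omega)]

theorem pvFB_len (adj : List (List Int)) {N : Nat} (hN : 0 < N) :
    ∀ mask l : Nat, (fB adj N mask l).length = N := by
  intro mask
  induction mask using Nat.strong_induction_on with
  | _ mask ih =>
    intro l
    rw [fB]
    split
    case isTrue h =>
      split
      case isTrue => simp; omega
      case isFalse hne =>
        have hrest : mask - 2 ^ l < mask := by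
          have h1 := Nat.ge_two_pow_of_testBit h
          have h2 := Nat.two_pow_pos l
          omega
        have aux : ∀ (L : List Nat) (acc : List Int), acc.length = N →
            (L.foldl
              (fun acc prev =>
                if mask - 2 ^ l &&& 2 ^ prev ≠ 0 then
                  List.zipWith (· + ·) acc
                    (if pvAdj adj prev l ≠ 0 then
                      (0 : Int) :: (fB adj N (mask - 2 ^ l) prev).dropLast
                     else fB adj N (mask - 2 ^ l) prev)
                else acc) acc).length = N := by
          intro L
          induction L with
          | nil => intro acc ha; simpa
          | cons p L ihL =>
            intro acc ha
            simp only [List.foldl_cons]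
            apply ihL
            split
            · rw [List.length_zipWith]
              split
              · rw [List.length_cons, List.length_dropLast, ih _ hrest p]
                omega
              · rw [ih _ hrest p]
                omega
            · exact ha
        exact aux _ _ (by simp)
    case isFalse => simp

theorem pvShiftGetD {xs : List Int} {N f : Nat} (hx : xs.length = N) (hf : f < N) :
    ((0 : Int) :: xs.dropLast).getD f 0 = if f = 0 then 0 else xs.getD (f - 1) 0 := by
  match f with
  | 0 => simp
  | (g + 1) =>
    rw [if_neg (by omega)]
    have h1 : g < xs.dropLast.length := by rw [List.length_dropLast]; omega
    have h2 : ((0 : Int) :: xs.dropLast).getD (g + 1) 0 = xs.dropLast.getD g 0 := rfl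
    rw [h2, List.getD_eq_getElem _ _ h1, List.getElem_dropLast,
      show g + 1 - 1 = g from rfl, List.getD_eq_getElem _ _ (by omega)]

theorem pvFB_base (adj : List (List Int)) (N l : Nat) :
    fB adj N (2 ^ l) l = (1 : Int) :: List.replicate (N - 1) 0 := by
  rw [fB]
  simp [Nat.testBit_two_pow_self]

theorem pvFBsum (adj : List (List Int)) {N M l : Nat} (hl : l < N)
    (hb : M.testBit l = true) (hne : M ≠ 2 ^ l) {f : Nat} (hf : f < N) :
    (fB adj N M l).getD f 0 =
      ∑ p ∈ Finset.range N,
        if (M - 2 ^ l).testBit p = true then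
          (if pvAdj adj p l ≠ 0 then
             (if f = 0 then 0 else (fB adj N (M - 2 ^ l) p).getD (f - 1) 0)
           else (fB adj N (M - 2 ^ l) p).getD f 0)
        else 0 := by
  have hN : 0 < N := by omega
  rw [fB, dif_pos hb, if_neg hne]
  have aux : ∀ K : Nat, ∀ acc : List Int, acc.length = N →
      ((List.range K).foldl
        (fun acc prev =>
          if M - 2 ^ l &&& 2 ^ prev ≠ 0 then
            List.zipWith (· + ·) acc
              (if pvAdj adj prev l ≠ 0 then
                (0 : Int) :: (fB adj N (M - 2 ^ l) prev).dropLast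
               else fB adj N (M - 2 ^ l) prev)
          else acc) acc).length = N ∧
      ((List.range K).foldl
        (fun acc prev =>
          if M - 2 ^ l &&& 2 ^ prev ≠ 0 then
            List.zipWith (· + ·) acc
              (if pvAdj adj prev l ≠ 0 then
                (0 : Int) :: (fB adj N (M - 2 ^ l) prev).dropLast
               else fB adj N (M - 2 ^ l) prev)
          else acc) acc).getD f 0 =
        acc.getD f 0 + ∑ p ∈ Finset.range K,
          (if M - 2 ^ l &&& 2 ^ p ≠ 0 then
            (if pvAdj adj p l ≠ 0 then
              ((0 : Int) :: (fB adj N (M - 2 ^ l) p).dropLast).getD f 0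
             else (fB adj N (M - 2 ^ l) p).getD f 0)
           else 0) := by
    intro K
    induction K with
    | zero => intro acc ha; simp [ha]
    | succ K ihK =>
      intro acc ha
      obtain ⟨ihl, ihv⟩ := ihK acc ha
      rw [List.range_succ, List.foldl_append, List.foldl_cons, List.foldl_nil,
        Finset.sum_range_succ]
      have hglen : (if pvAdj adj K l ≠ 0 then
          (0 : Int) :: (fB adj N (M - 2 ^ l) K).dropLast
         else fB adj N (M - 2 ^ l) K).length = N := by
        split
        · rw [List.length_cons, List.length_dropLast, pvFB_len adj hN]
          omega
        · exact pvFB_len adj hN _ _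
      split
      next hcond =>
        constructor
        · rw [List.length_zipWith, ihl, hglen]
          omega
        · rw [pvZipGetD ihl hglen hf, ihv]
          by_cases hA : pvAdj adj K l ≠ 0 <;> simp [hA] <;> ring
      next hcond =>
        refine ⟨ihl, ?_⟩
        rw [ihv, add_zero]
  obtain ⟨-, hv⟩ := aux N (List.replicate N 0) (by simp)
  rw [hv]
  have hz : (List.replicate N (0 : Int)).getD f 0 = 0 := by
    rw [List.getD_eq_getElem _ _ (by simpa using hf)]
    simp
  rw [hz, zero_add]
  apply Finset.sum_congr rfl
  intro p hp
  have hand : (M - 2 ^ l &&& 2 ^ p ≠ 0) ↔ (M - 2 ^ l).testBit p = true := by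
    rw [Ne, pv_and_two_pow_eq_zero]
    cases (M - 2 ^ l).testBit p <;> simp
  by_cases hc : (M - 2 ^ l).testBit p = true
  · rw [if_pos (hand.mpr hc), if_pos hc]
    split
    · rw [pvShiftGetD (pvFB_len adj hN _ _) hf]
    · rfl
  · rw [if_neg (fun hcc => hc (hand.mp hcc)), if_neg hc]

/- ## push-phase characterisation -/

def pvTgt (adj : List (List Int)) (la nx fw : Nat) : Nat :=
  if pvAdj adj la nx ≠ 0 then fw + 1 else fw

def pvC (adj : List (List Int)) (N : Nat) (dp : List (List (List Int)))
    (mask M l f : Nat) : Int :=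
  ∑ la ∈ Finset.range N, ∑ fw ∈ Finset.range N, ∑ nx ∈ Finset.range N,
    if mask.testBit la = true ∧ mask.testBit nx = false ∧ M = mask ||| 2 ^ nx ∧
        l = nx ∧ f = pvTgt adj la nx fw
    then pvGet3 dp mask la fw else 0

theorem pvL3 (adj : List (List Int)) {N mask : Nat} (la fw : Nat) (hm : mask < 2 ^ N)
    (hfw : fw < N) :
    ∀ K, K ≤ N → ∀ u, pvShape N u →
      pvShape N ((List.range K).foldl (pvPush adj mask la fw) u) ∧
      ∀ M l f, f < N →
        pvGet3 ((List.range K).foldl (pvPush adj mask la fw) u) M l f =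
          pvGet3 u M l f + ∑ nx ∈ Finset.range K,
            (if mask.testBit nx = false ∧ M = mask ||| 2 ^ nx ∧ l = nx ∧
                f = pvTgt adj la nx fw
             then pvGet3 u mask la fw else 0) := by
  intro K
  induction K with
  | zero => intro _ u hu; exact ⟨hu, fun M l f hf => by simp⟩
  | succ K ihK =>
    intro hK u hu
    obtain ⟨hsh', hchar⟩ := ihK (by omega) u hu
    rw [List.range_succ, List.foldl_append, List.foldl_cons, List.foldl_nil]
    set u' := (List.range K).foldl (pvPush adj mask la fw) u with hu'def
    have hpres : pvGet3 u' mask la fw = pvGet3 u mask la fw := by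
      rw [hchar mask la fw hfw, Finset.sum_eq_zero, add_zero]
      intro nx _
      rw [if_neg]
      rintro ⟨hb0, heq, -⟩
      exact pv_or_ne hb0 heq.symm
    have hKN : K < N := by omega
    unfold pvPush
    by_cases hbit : mask &&& 2 ^ K ≠ 0
    · rw [if_pos hbit]
      have htb : mask.testBit K = true := by
        rcases Bool.eq_false_or_eq_true (mask.testBit K) with h | h
        · exact h
        · exact absurd ((pv_and_two_pow_eq_zero mask K).mpr h) hbit
      refine ⟨hsh', fun M l f hf => ?_⟩
      rw [hchar M l f hf, Finset.sum_range_succ]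
      have h0 : (if mask.testBit K = false ∧ M = mask ||| 2 ^ K ∧ l = K ∧
          f = pvTgt adj la K fw then pvGet3 u mask la fw else 0) = 0 := by
        rw [if_neg]
        rintro ⟨hc, -⟩
        rw [htb] at hc
        exact absurd hc (by decide)
      rw [h0, add_zero]
    · rw [if_neg hbit]
      have htb : mask.testBit K = false := (pv_and_two_pow_eq_zero mask K).mp (not_not.mp hbit)
      have hnm : mask ||| 2 ^ K < 2 ^ N :=
        Nat.or_lt_two_pow hm (Nat.pow_lt_pow_right (by omega) hKN)
      have inb : ∀ tgt, tgt < N → pvTgt adj la K fw = tgt →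
          pvShape N (pvSet3 u' (mask ||| 2 ^ K) K tgt
            (pvGet3 u' (mask ||| 2 ^ K) K tgt + pvGet3 u' mask la fw)) ∧
          ∀ M l f, f < N →
            pvGet3 (pvSet3 u' (mask ||| 2 ^ K) K tgt
              (pvGet3 u' (mask ||| 2 ^ K) K tgt + pvGet3 u' mask la fw)) M l f =
              pvGet3 u M l f + ∑ nx ∈ Finset.range (K + 1),
                (if mask.testBit nx = false ∧ M = mask ||| 2 ^ nx ∧ l = nx ∧
                    f = pvTgt adj la nx fw
                 then pvGet3 u mask la fw else 0) := by
        intro tgt htgtN htgt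
        refine ⟨pvSet3_shape hsh' _ _ _ _, fun M l f hf => ?_⟩
        rw [pvGet3_set3 hsh' hnm hKN htgtN, Finset.sum_range_succ]
        by_cases hP : M = mask ||| 2 ^ K ∧ l = K ∧ f = tgt
        · rw [if_pos ⟨hP.1, hP.2.1, hP.2.2⟩, hP.1, hP.2.1, hP.2.2, hpres,
            hchar (mask ||| 2 ^ K) K tgt htgtN, if_pos ⟨htb, rfl, rfl, htgt.symm⟩]
          ring
        · rw [if_neg hP, hchar M l f hf]
          have h0 : (if mask.testBit K = false ∧ M = mask ||| 2 ^ K ∧ l = K ∧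
              f = pvTgt adj la K fw then pvGet3 u mask la fw else 0) = 0 := by
            rw [if_neg]
            rintro ⟨-, h1, h2, h3⟩
            exact hP ⟨h1, h2, htgt ▸ h3⟩
          rw [h0, add_zero]
      by_cases hadj : pvAdj adj la K ≠ 0
      · rw [if_pos hadj]
        have htgt : pvTgt adj la K fw = fw + 1 := by unfold pvTgt; rw [if_pos hadj]
        by_cases hfw1 : fw + 1 < N
        · exact inb (fw + 1) hfw1 htgt
        · have hfwN : N ≤ fw + 1 := by omega
          refine ⟨pvSet3_shape hsh' _ _ _ _, fun M l f hf => ?_⟩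
          rw [pvGet3_set3_oob hsh' hfwN, hchar M l f hf, Finset.sum_range_succ]
          have h0 : (if mask.testBit K = false ∧ M = mask ||| 2 ^ K ∧ l = K ∧
              f = pvTgt adj la K fw then pvGet3 u mask la fw else 0) = 0 := by
            rw [if_neg]
            rintro ⟨-, -, -, h3⟩
            rw [htgt] at h3
            omega
          rw [h0, add_zero]
      · rw [if_neg hadj]
        have htgt : pvTgt adj la K fw = fw := by unfold pvTgt; rw [if_neg hadj]
        exact inb fw hfw htgt

theorem pvL2 (adj : List (List Int)) {N mask : Nat} (la : Nat) (hm : mask < 2 ^ N) :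
    ∀ K, K ≤ N → ∀ u, pvShape N u →
      pvShape N ((List.range K).foldl (pvFwdStep adj N mask la) u) ∧
      ∀ M l f, f < N →
        pvGet3 ((List.range K).foldl (pvFwdStep adj N mask la) u) M l f =
          pvGet3 u M l f + ∑ fw ∈ Finset.range K, ∑ nx ∈ Finset.range N,
            (if mask.testBit nx = false ∧ M = mask ||| 2 ^ nx ∧ l = nx ∧
                f = pvTgt adj la nx fw
             then pvGet3 u mask la fw else 0) := by
  intro K
  induction K with
  | zero => intro _ u hu; exact ⟨hu, fun M l f hf => by simp⟩
  | succ K ihK =>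
    intro hK u hu
    obtain ⟨hsh', hchar⟩ := ihK (by omega) u hu
    rw [List.range_succ, List.foldl_append, List.foldl_cons, List.foldl_nil]
    set u' := (List.range K).foldl (pvFwdStep adj N mask la) u with hu'def
    have hKN : K < N := by omega
    have hpres : ∀ fw', fw' < N → pvGet3 u' mask la fw' = pvGet3 u mask la fw' := by
      intro fw' hfw'
      rw [hchar mask la fw' hfw', Finset.sum_eq_zero, add_zero]
      intro fw'' _
      apply Finset.sum_eq_zero
      intro nx _
      rw [if_neg]
      rintro ⟨hb0, heq, -⟩
      exact pv_or_ne hb0 heq.symm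
    unfold pvFwdStep
    by_cases hz : pvGet3 u' mask la K = 0
    · rw [if_pos hz]
      refine ⟨hsh', fun M l f hf => ?_⟩
      rw [hchar M l f hf, Finset.sum_range_succ]
      have hzz : pvGet3 u mask la K = 0 := by rw [← hpres K hKN]; exact hz
      have h0 : (∑ nx ∈ Finset.range N,
          if mask.testBit nx = false ∧ M = mask ||| 2 ^ nx ∧ l = nx ∧
              f = pvTgt adj la nx K
          then pvGet3 u mask la K else 0) = 0 := by
        apply Finset.sum_eq_zero
        intro nx _
        rw [hzz]
        split <;> rfl
      rw [h0, add_zero]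
    · rw [if_neg hz]
      obtain ⟨hsh'', hchar'⟩ := pvL3 adj la K hm hKN N le_rfl u' hsh'
      refine ⟨hsh'', fun M l f hf => ?_⟩
      rw [hchar' M l f hf, hchar M l f hf, hpres K hKN, Finset.sum_range_succ]
      ring
    
theorem pvL1 (adj : List (List Int)) {N mask : Nat} (hm : mask < 2 ^ N) :
    ∀ K, K ≤ N → ∀ u, pvShape N u →
      pvShape N ((List.range K).foldl (pvLastStep adj N mask) u) ∧
      ∀ M l f, f < N →
        pvGet3 ((List.range K).foldl (pvLastStep adj N mask) u) M l f =
          pvGet3 u M l f + ∑ la ∈ Finset.range K, ∑ fw ∈ Finset.range N, ∑ nx ∈ Finset.range N,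
            (if mask.testBit la = true ∧ mask.testBit nx = false ∧ M = mask ||| 2 ^ nx ∧
                l = nx ∧ f = pvTgt adj la nx fw
             then pvGet3 u mask la fw else 0) := by
  intro K
  induction K with
  | zero => intro _ u hu; exact ⟨hu, fun M l f hf => by simp⟩
  | succ K ihK =>
    intro hK u hu
    obtain ⟨hsh', hchar⟩ := ihK (by omega) u hu
    rw [List.range_succ, List.foldl_append, List.foldl_cons, List.foldl_nil]
    set u' := (List.range K).foldl (pvLastStep adj N mask) u with hu'def
    have hKN : K < N := by omega
    have hpres : ∀ la' fw', fw' < N → pvGet3 u' mask la' fw' = pvGet3 u mask la' fw' := by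
      intro la' fw' hfw'
      rw [hchar mask la' fw' hfw', Finset.sum_eq_zero, add_zero]
      intro la'' _
      apply Finset.sum_eq_zero
      intro fw'' _
      apply Finset.sum_eq_zero
      intro nx _
      rw [if_neg]
      rintro ⟨-, hb0, heq, -⟩
      exact pv_or_ne hb0 heq.symm
    unfold pvLastStep
    by_cases hbit : mask &&& 2 ^ K = 0
    · rw [if_pos hbit]
      have htb : mask.testBit K = false := (pv_and_two_pow_eq_zero mask K).mp hbit
      refine ⟨hsh', fun M l f hf => ?_⟩
      rw [hchar M l f hf, Finset.sum_range_succ]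
      have h0 : (∑ fw ∈ Finset.range N, ∑ nx ∈ Finset.range N,
          if mask.testBit K = true ∧ mask.testBit nx = false ∧ M = mask ||| 2 ^ nx ∧
              l = nx ∧ f = pvTgt adj K nx fw
          then pvGet3 u mask K fw else 0) = 0 := by
        apply Finset.sum_eq_zero
        intro fw _
        apply Finset.sum_eq_zero
        intro nx _
        rw [if_neg]
        rintro ⟨hc, -⟩
        rw [htb] at hc
        exact Bool.false_ne_true hc
      rw [h0, add_zero]
    · rw [if_neg hbit]
      have htb : mask.testBit K = true := by
        rcases Bool.eq_false_or_eq_true (mask.testBit K) with h | h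
        · exact h
        · exact absurd ((pv_and_two_pow_eq_zero mask K).mpr h) hbit
      obtain ⟨hsh'', hchar'⟩ := pvL2 adj K hm N le_rfl u' hsh'
      refine ⟨hsh'', fun M l f hf => ?_⟩
      rw [hchar' M l f hf, hchar M l f hf, Finset.sum_range_succ]
      have hrw : (∑ fw ∈ Finset.range N, ∑ nx ∈ Finset.range N,
          if mask.testBit nx = false ∧ M = mask ||| 2 ^ nx ∧ l = nx ∧
              f = pvTgt adj K nx fw
          then pvGet3 u' mask K fw else 0) =
          ∑ fw ∈ Finset.range N, ∑ nx ∈ Finset.range N,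
            (if mask.testBit K = true ∧ mask.testBit nx = false ∧ M = mask ||| 2 ^ nx ∧
                l = nx ∧ f = pvTgt adj K nx fw
             then pvGet3 u mask K fw else 0) := by
        apply Finset.sum_congr rfl
        intro fw hfw
        apply Finset.sum_congr rfl
        intro nx _
        rw [hpres K fw (Finset.mem_range.mp hfw)]
        simp only [htb, true_and]
      rw [hrw]
      ring

theorem pvPM (adj : List (List Int)) {N mask : Nat} (hm : mask < 2 ^ N)
    (u : List (List (List Int))) (hu : pvShape N u) :
    pvShape N (pvMaskStep adj N u mask) ∧
    ∀ M l f, f < N →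
      pvGet3 (pvMaskStep adj N u mask) M l f = pvGet3 u M l f + pvC adj N u mask M l f := by
  obtain ⟨h1, h2⟩ := pvL1 adj hm N le_rfl u hu
  refine ⟨h1, fun M l f hf => ?_⟩
  rw [pvC]
  exact h2 M l f hf

/- ## the invariant -/

def pvE (adj : List (List Int)) (N m M l f : Nat) : Int :=
  if M < 2 ^ N ∧ M.testBit l = true ∧ M - 2 ^ l ≤ m then (fB adj N M l).getD f 0 else 0

def pvDp1 (N : Nat) : List (List (List Int)) :=
  (List.range N).foldl (fun dp v => pvSet3 dp (2 ^ v) v 0 1)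
    (List.replicate (2 ^ N) (List.replicate N (List.replicate N (0 : Int))))

theorem pvDp1_char (N : Nat) :
    pvShape N (pvDp1 N) ∧
    ∀ M l f, pvGet3 (pvDp1 N) M l f = if M = 2 ^ l ∧ l < N ∧ f = 0 then 1 else 0 := by
  have aux : ∀ K, K ≤ N →
      pvShape N ((List.range K).foldl (fun dp v => pvSet3 dp (2 ^ v) v 0 1)
        (List.replicate (2 ^ N) (List.replicate N (List.replicate N (0 : Int))))) ∧
      ∀ M l f, pvGet3 ((List.range K).foldl (fun dp v => pvSet3 dp (2 ^ v) v 0 1)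
        (List.replicate (2 ^ N) (List.replicate N (List.replicate N (0 : Int))))) M l f =
          if M = 2 ^ l ∧ l < K ∧ f = 0 then 1 else 0 := by
    intro K
    induction K with
    | zero =>
      intro _
      constructor
      · refine ⟨by simp, ?_⟩
        intro r hr
        have hr' := List.eq_of_mem_replicate hr
        subst hr'
        refine ⟨by simp, ?_⟩
        intro q hq
        have hq' := List.eq_of_mem_replicate hq
        subst hq'
        simp
      · intro M l f
        rw [List.range_zero, List.foldl_nil, if_neg (by omega)]
        simp only [pvGet3, List.getD_eq_getElem?_getD, List.getElem?_replicate]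
        split_ifs <;> simp [List.getElem?_replicate] <;> split_ifs <;> simp
    | succ K ihK =>
      intro hK
      obtain ⟨hsh, hchar⟩ := ihK (by omega)
      rw [List.range_succ, List.foldl_append, List.foldl_cons, List.foldl_nil]
      have hKN : K < N := by omega
      have hb : (2 : Nat) ^ K < 2 ^ N := Nat.pow_lt_pow_right (by omega) hKN
      refine ⟨pvSet3_shape hsh _ _ _ _, fun M l f => ?_⟩
      rw [pvGet3_set3 hsh hb hKN (by omega), hchar M l f]
      by_cases hP : M = 2 ^ K ∧ l = K ∧ f = 0
      · rw [if_pos hP, if_pos ⟨by rw [hP.2.1, ← hP.1], by omega, hP.2.2⟩]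
      · rw [if_neg hP]
        by_cases hQ : M = 2 ^ l ∧ l < K ∧ f = 0
        · rw [if_pos hQ, if_pos ⟨hQ.1, by omega, hQ.2.2⟩]
        · rw [if_neg hQ, if_neg]
          rintro ⟨q1, q2, q3⟩
          by_cases hlK : l = K
          · exact hP ⟨by rw [← hlK]; exact q1, hlK, q3⟩
          · exact hQ ⟨q1, by omega, q3⟩
  exact ⟨(aux N le_rfl).1, (aux N le_rfl).2⟩

theorem pvFwSum (adj : List (List Int)) {N : Nat} (S : Nat → Int) (la l : Nat)
    {f : Nat} (hf : f < N) :
    (∑ fw ∈ Finset.range N, if f = pvTgt adj la l fw then S fw else 0) =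
      if pvAdj adj la l ≠ 0 then (if f = 0 then 0 else S (f - 1)) else S f := by
  unfold pvTgt
  by_cases ha : pvAdj adj la l ≠ 0
  · simp only [if_pos ha]
    by_cases h0 : f = 0
    · subst h0
      rw [if_pos rfl, Finset.sum_eq_zero]
      intro fw _
      rw [if_neg (by omega)]
    · rw [if_neg h0, Finset.sum_eq_single (f - 1)]
      · rw [if_pos (by omega)]
      · intro b hb hbne
        rw [if_neg (by omega)]
      · intro hnot
        exact absurd (Finset.mem_range.mpr (by omega)) hnot
  · simp only [if_neg ha]
    rw [Finset.sum_eq_single f]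
    · rw [if_pos rfl]
    · intro b hb hbne
      rw [if_neg (fun h => hbne h.symm)]
    · intro hnot
      exact absurd (Finset.mem_range.mpr hf) hnot

theorem pvInv (adj : List (List Int)) (N : Nat) :
    ∀ m, m ≤ 2 ^ N - 1 →
      pvShape N ((List.range' 1 m).foldl (pvMaskStep adj N) (pvDp1 N)) ∧
      ∀ M l f, l < N → f < N →
        pvGet3 ((List.range' 1 m).foldl (pvMaskStep adj N) (pvDp1 N)) M l f =
          pvE adj N m M l f := by
  intro m
  induction m with
  | zero =>
    intro _
    obtain ⟨hsh, hchar⟩ := pvDp1_char N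
    refine ⟨by simpa using hsh, fun M l f hl hf => ?_⟩
    rw [show List.range' 1 0 = [] from rfl, List.foldl_nil, hchar M l f]
    unfold pvE
    by_cases hc : M < 2 ^ N ∧ M.testBit l = true ∧ M - 2 ^ l ≤ 0
    · obtain ⟨h1, h2, h3⟩ := id hc
      have hle := Nat.ge_two_pow_of_testBit h2
      have hM : M = 2 ^ l := by omega
      rw [if_pos hc, hM, pvFB_base]
      by_cases hf0 : f = 0
      · subst hf0
        rw [if_pos ⟨rfl, hl, rfl⟩]
        rfl
      · rw [if_neg (by tauto)]
        match f, hf0 with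
        | (g + 1), _ =>
          show (0 : Int) = (List.replicate (N - 1) (0 : Int)).getD g 0
          rw [List.getD_eq_getElem?_getD, List.getElem?_replicate]
          split_ifs <;> rfl
    · rw [if_neg hc, if_neg]
      rintro ⟨q1, q2, q3⟩
      exact hc ⟨by rw [q1]; exact Nat.pow_lt_pow_right (by omega) q2,
        by rw [q1]; exact Nat.testBit_two_pow_self,
        by rw [q1]; omega⟩
  | succ m ihm =>
    intro hm1
    obtain ⟨hsh, hchar⟩ := ihm (by omega)
    have hm2 : m + 1 < 2 ^ N := by have := Nat.two_pow_pos N; omega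
    rw [List.range'_concat]
    have hone : (1 : Nat) + 1 * m = m + 1 := by omega
    rw [hone, List.foldl_append, List.foldl_cons, List.foldl_nil]
    set t := (List.range' 1 m).foldl (pvMaskStep adj N) (pvDp1 N) with htdef
    obtain ⟨hsh2, hchar2⟩ := pvPM adj hm2 t hsh
    refine ⟨hsh2, fun M l f hl hf => ?_⟩
    rw [hchar2 M l f hf, hchar M l f hl hf]
    unfold pvC pvE
    have hCzero : ¬(M < 2 ^ N ∧ M.testBit l = true ∧ M - 2 ^ l = m + 1) →
        (∑ la ∈ Finset.range N, ∑ fw ∈ Finset.range N, ∑ nx ∈ Finset.range N,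
          if (m + 1).testBit la = true ∧ (m + 1).testBit nx = false ∧
              M = m + 1 ||| 2 ^ nx ∧ l = nx ∧ f = pvTgt adj la nx fw
          then pvGet3 t (m + 1) la fw else 0) = 0 := by
      intro hno
      apply Finset.sum_eq_zero
      intro la _
      apply Finset.sum_eq_zero
      intro fw _
      apply Finset.sum_eq_zero
      intro nx hnx
      rw [if_neg]
      rintro ⟨-, hb0, hMeq, hlnx, -⟩
      subst hlnx
      refine hno ⟨?_, ?_, ?_⟩
      · rw [hMeq]
        exact Nat.or_lt_two_pow hm2
          (Nat.pow_lt_pow_right (by omega) (Finset.mem_range.mp hnx))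
      · rw [hMeq]
        exact pv_or_testBit_self _ _
      · rw [hMeq]
        exact pv_or_sub hb0
    by_cases hcond : M < 2 ^ N ∧ M.testBit l = true
    · obtain ⟨hMlt, hMtb⟩ := hcond
      obtain ⟨hcl0, hclor, hcle⟩ := pv_clear hMtb
      by_cases hle : M - 2 ^ l ≤ m
      · rw [if_pos ⟨hMlt, hMtb, hle⟩, if_pos ⟨hMlt, hMtb, by omega⟩,
          hCzero (by omega), add_zero]
      · by_cases heq : M - 2 ^ l = m + 1
        · rw [if_neg (by rintro ⟨-, -, h⟩; omega), zero_add,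
            if_pos ⟨hMlt, hMtb, by omega⟩]
          have hMne : M ≠ 2 ^ l := by
            intro e
            rw [e, Nat.sub_self] at heq
            omega
          rw [pvFBsum adj hl hMtb hMne hf, heq]
          have hor2 : M = m + 1 ||| 2 ^ l := by rw [← hclor, heq]
          have htbl : (m + 1).testBit l = false := by rw [← heq]; exact hcl0
          apply Finset.sum_congr rfl
          intro la hla
          have hlaN := Finset.mem_range.mp hla
          have step1 : ∀ fw ∈ Finset.range N,
              (∑ nx ∈ Finset.range N,
                if (m + 1).testBit la = true ∧ (m + 1).testBit nx = false ∧
                    M = m + 1 ||| 2 ^ nx ∧ l = nx ∧ f = pvTgt adj la nx fw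
                then pvGet3 t (m + 1) la fw else 0) =
              (if (m + 1).testBit la = true ∧ f = pvTgt adj la l fw
               then (fB adj N (m + 1) la).getD fw 0 else 0) := by
            intro fw hfw
            have hfwN := Finset.mem_range.mp hfw
            have hval : pvGet3 t (m + 1) la fw =
                if (m + 1).testBit la = true then (fB adj N (m + 1) la).getD fw 0 else 0 := by
              rw [hchar (m + 1) la fw hlaN hfwN]
              unfold pvE
              have h2la := Nat.two_pow_pos la
              by_cases htla : (m + 1).testBit la = true
              · rw [if_pos ⟨hm2, htla, by omega⟩, if_pos htla]
              · rw [if_neg (by tauto), if_neg htla]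
            rw [Finset.sum_eq_single l]
            · by_cases hc : (m + 1).testBit la = true ∧ f = pvTgt adj la l fw
              · rw [if_pos ⟨hc.1, htbl, hor2, rfl, hc.2⟩, hval, if_pos hc.1, if_pos hc]
              · rw [if_neg (by rintro ⟨x1, -, -, -, x5⟩; exact hc ⟨x1, x5⟩), if_neg hc]
            · intro nx hnx hne
              rw [if_neg]
              rintro ⟨-, -, -, hl_eq, -⟩
              exact hne hl_eq.symm
            · intro habs
              exact absurd (Finset.mem_range.mpr hl) habs
          rw [Finset.sum_congr rfl step1]
          by_cases htla : (m + 1).testBit la = true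
          · simp only [htla, true_and, if_pos rfl]
            exact pvFwSum adj (fun fw => (fB adj N (m + 1) la).getD fw 0) la l hf
          · rw [if_neg htla, Finset.sum_eq_zero]
            intro fw _
            rw [if_neg (by tauto)]
        · rw [if_neg (by rintro ⟨-, -, h⟩; omega),
            if_neg (by rintro ⟨-, -, h⟩; omega), hCzero (by omega), add_zero]
    · rw [if_neg (by tauto), if_neg (by tauto), hCzero (by tauto), add_zero]

/- ## assembling the outputs -/

theorem pvSetFold (g : Nat → Int) (K : Nat) :
    ∀ F : List Int,
      ((List.range K).foldl (fun F fwd => F.set fwd (F.getD fwd 0 + g fwd)) F).length = F.length ∧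
      ∀ i, ((List.range K).foldl (fun F fwd => F.set fwd (F.getD fwd 0 + g fwd)) F).getD i 0 =
        if i < K ∧ i < F.length then F.getD i 0 + g i else F.getD i 0 := by
  induction K with
  | zero =>
    intro F
    exact ⟨rfl, fun i => by rw [List.range_zero, List.foldl_nil, if_neg (by omega)]⟩
  | succ K ihK =>
    intro F
    obtain ⟨ihl, ihv⟩ := ihK F
    rw [List.range_succ, List.foldl_append, List.foldl_cons, List.foldl_nil]
    constructor
    · rw [List.length_set, ihl]
    · intro i
      rw [pvGetDSet, ihl, ihv i, ihv K]
      by_cases hiK : i = K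
      · subst hiK
        by_cases hil : i < F.length
        · rw [if_pos ⟨rfl, hil⟩, if_neg (by omega), if_pos (by omega)]
        · rw [if_neg (by tauto), if_neg (by omega), if_neg (by omega)]
      · rw [if_neg (by tauto)]
        by_cases hc : i < K ∧ i < F.length
        · rw [if_pos hc, if_pos ⟨by omega, hc.2⟩]
        · rw [if_neg hc, if_neg (by omega)]

theorem pvAFold (N : Nat) (g : Nat → Nat → Int) :
    ∀ K,
      ((List.range K).foldl (fun F last => (List.range N).foldl
          (fun F fwd => F.set fwd (F.getD fwd 0 + g last fwd)) F)
        (List.replicate N (0 : Int))).length = N ∧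
      ∀ i, i < N →
        ((List.range K).foldl (fun F last => (List.range N).foldl
            (fun F fwd => F.set fwd (F.getD fwd 0 + g last fwd)) F)
          (List.replicate N (0 : Int))).getD i 0 = ∑ la ∈ Finset.range K, g la i := by
  intro K
  induction K with
  | zero =>
    refine ⟨by simp, fun i hi => ?_⟩
    rw [List.range_zero, List.foldl_nil, List.getD_eq_getElem?_getD,
      List.getElem?_replicate, if_pos hi]
    simp
  | succ K ih =>
    obtain ⟨ihl, ihv⟩ := ih
    rw [List.range_succ, List.foldl_append, List.foldl_cons, List.foldl_nil]
    obtain ⟨sl, sv⟩ := pvSetFold (g K) N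
      ((List.range K).foldl (fun F last => (List.range N).foldl
        (fun F fwd => F.set fwd (F.getD fwd 0 + g last fwd)) F)
        (List.replicate N (0 : Int)))
    refine ⟨by rw [sl, ihl], fun i hi => ?_⟩
    rw [sv i, ihl, if_pos ⟨hi, hi⟩, ihv i hi, Finset.sum_range_succ]

theorem pvBFold (adj : List (List Int)) (N : Nat) :
    ∀ K, K ≤ N →
      ((List.range K).foldl
          (fun F last => List.zipWith (· + ·) F (fB adj N (2 ^ N - 1) last))
        (List.replicate N (0 : Int))).length = N ∧
      ∀ i, i < N →
        ((List.range K).foldl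
            (fun F last => List.zipWith (· + ·) F (fB adj N (2 ^ N - 1) last))
          (List.replicate N (0 : Int))).getD i 0 =
          ∑ la ∈ Finset.range K, (fB adj N (2 ^ N - 1) la).getD i 0 := by
  intro K
  induction K with
  | zero =>
    intro _
    refine ⟨by simp, fun i hi => ?_⟩
    rw [List.range_zero, List.foldl_nil, List.getD_eq_getElem?_getD,
      List.getElem?_replicate, if_pos hi]
    simp
  | succ K ih =>
    intro hK
    obtain ⟨ihl, ihv⟩ := ih (by omega)
    rw [List.range_succ, List.foldl_append, List.foldl_cons, List.foldl_nil]
    have hlen := pvFB_len adj (by omega : 0 < N) (2 ^ N - 1) K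
    refine ⟨by rw [List.length_zipWith, ihl, hlen]; omega, fun i hi => ?_⟩
    rw [pvZipGetD ihl hlen hi, ihv i hi, Finset.sum_range_succ]

-- ===== VERDICT (by name: the statement is the Claim_ definition above) =====
theorem compute_F_dp_digraph_spec : Claim_equal_compute_F_dp_digraph := by
  intro adj n _ _
  unfold Spec_compute_F_dp_digraph compute_F_dp_digraph compute_F_dp_digraph_alt
  set N := n.toNat with hNdef
  dsimp only
  rw [show (List.range N).foldl (fun dp v => pvSet3 dp (2 ^ v) v 0 1)
      (List.replicate (2 ^ N) (List.replicate N (List.replicate N (0 : Int)))) = pvDp1 N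
    from rfl]
  obtain ⟨hshI, hcharI⟩ := pvInv adj N (2 ^ N - 1) le_rfl
  obtain ⟨hAl, hAv⟩ := pvAFold N
    (fun la fw => pvGet3 ((List.range' 1 (2 ^ N - 1)).foldl (pvMaskStep adj N) (pvDp1 N))
      (2 ^ N - 1) la fw) N
  obtain ⟨hBl, hBv⟩ := pvBFold adj N N le_rfl
  apply List.ext_getElem
  · rw [hAl, hBl]
  · intro i h1 h2
    have hi : i < N := by rw [← hAl]; exact h1
    rw [← List.getD_eq_getElem _ _ h1, ← List.getD_eq_getElem _ _ h2,
      hAv i hi, hBv i hi]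
    apply Finset.sum_congr rfl
    intro la hla
    have hlaN := Finset.mem_range.mp hla
    rw [hcharI (2 ^ N - 1) la i hlaN hi]
    unfold pvE
    rw [if_pos ⟨by have := Nat.two_pow_pos N; omega,
      by rw [Nat.testBit_two_pow_sub_one]; simp [hlaN],
      Nat.sub_le _ _⟩]
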